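-- pv_equiv track=rewrite | github.com/arturlevickij/Algo_lab | src/bilboard.py | bilboard
-- ===== SOURCE A (Python) =====
-- def bilboard(k, t, l):
--     if len(l) % k != 0:
--         itr = len(l) % k
--     else:
--         itr = len(l) // k
--     paints = [0] * itr
--     suma = []
--     for i, el in enumerate(l):
--         if i % itr == 0 and i != 0:
--             suma.append(sum(paints))
--             paints = [0] * itr
--         paints[i % itr] = t * el
--         if i + 1 == len(l):
--             suma.append(sum(paints))
--     min_time = max(suma)
--     return min_time
-- ===== SOURCE B (Python) =====
-- def bilboard(k, t, l):
--     # prefix-sum table: chunk sums are differences of prefix sums at chunk boundaries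
--     n = len(l)
--     r = n % k
--     itr = r if r != 0 else n // k
--     P = [0]
--     for i, el in enumerate(l):
--         P.append(P[i] + el)
--     return max(t * (P[min(i + itr, n)] - P[i]) for i in range(0, n, itr))
-- ===== Notes on version B (the rewrite author's own statement) =====
-- stated objective: alternative
-- what changed: Replaced A's element-by-element pass with a reused write-buffer, lazy flushes into a collected list and a final max by a prefix-sum table built once, after which each chunk sum is computed directly as t times the difference of two prefix sums at the chunk boundaries, maxed over range(0, n, itr).
import Mathlib
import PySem

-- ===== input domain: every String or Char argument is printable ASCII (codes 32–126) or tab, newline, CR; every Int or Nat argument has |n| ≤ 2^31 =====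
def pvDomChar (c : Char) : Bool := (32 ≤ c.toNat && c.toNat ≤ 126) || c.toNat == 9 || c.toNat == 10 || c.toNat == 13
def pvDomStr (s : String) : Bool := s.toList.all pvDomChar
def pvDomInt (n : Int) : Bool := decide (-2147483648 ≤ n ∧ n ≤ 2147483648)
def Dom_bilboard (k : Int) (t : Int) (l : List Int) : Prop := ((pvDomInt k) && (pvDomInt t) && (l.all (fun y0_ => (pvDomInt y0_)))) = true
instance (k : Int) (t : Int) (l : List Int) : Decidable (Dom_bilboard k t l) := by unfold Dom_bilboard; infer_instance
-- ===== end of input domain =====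

-- B replaces A's element-by-element pass (reused write-buffer, lazy flushes into a collected
-- list, final max) by a prefix-sum table: each chunk sum is t * (P[chunk end] - P[chunk start]),
-- maxed over the chunk starts range(0, n, itr) (objective: alternative algorithm, same cost).

-- ===== PORT A =====
-- loop body of A's 'for i, el in enumerate(l)' (flush on chunk boundary, write paints[i % itr], final append)
def stepA (t itr n : Int) (st : List Int × List Int) (p : Int × Int) : List Int × List Int :=
  let st1 := if PySem.Int.mod p.1 itr = 0 ∧ p.1 ≠ 0
    then (List.replicate itr.toNat 0, st.2 ++ [st.1.sum])
    else st
  let paints := st1.1.set (PySem.Int.mod p.1 itr).toNat (t * p.2)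
  (paints, if p.1 + 1 = n then st1.2 ++ [paints.sum] else st1.2)

def bilboard (k : Int) (t : Int) (l : List Int) : Int :=
  let n : Int := l.length
  let itr : Int := if PySem.Int.mod n k ≠ 0 then PySem.Int.mod n k else PySem.Int.floordiv n k
  let st := (PySem.List.enumerate l 0).foldl (stepA t itr n) (List.replicate itr.toNat 0, [])
  (PySem.List.max? st.2 (fun x => x)).getD 0

-- ===== PORT B =====
def bilboard_alt (k : Int) (t : Int) (l : List Int) : Int :=
  let n : Int := l.length
  let r : Int := PySem.Int.mod n k
  let itr : Int := if r ≠ 0 then r else PySem.Int.floordiv n k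
  -- P = [0]; for i, el in enumerate(l): P.append(P[i] + el)   (index i is always in range)
  let P := (PySem.List.enumerate l 0).foldl (fun P p => P ++ [PySem.List.pyGetD P p.1 0 + p.2]) [(0 : Int)]
  -- max(t * (P[min(i + itr, n)] - P[i]) for i in range(0, n, itr))
  (PySem.List.max? ((PySem.List.pyRange 0 n itr).map
      (fun i => t * (PySem.List.pyGetD P (min (i + itr) n) 0 - PySem.List.pyGetD P i 0))) (fun x => x)).getD 0

-- ===== PRECONDITION & SPEC =====
-- Pre_ excludes exactly the inputs where A raises: k ≤ 0 (ZeroDivisionError for k = 0,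
-- IndexError from a negative chunk size for k < 0) and l = [] (ValueError from max([])).
def Pre_bilboard (k : Int) (t : Int) (l : List Int) : Prop := 0 < k ∧ l ≠ []
instance (k : Int) (t : Int) (l : List Int) : Decidable (Pre_bilboard k t l) := by unfold Pre_bilboard; infer_instance

def pvWitness_bilboard : Int × Int × List Int := (2, 3, [1, 2, 3])

def Spec_bilboard (k : Int) (t : Int) (l : List Int) (out : Int) : Prop := out = bilboard_alt k t l
instance (k : Int) (t : Int) (l : List Int) (out : Int) : Decidable (Spec_bilboard k t l out) := by unfold Spec_bilboard; infer_instance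

-- ===== CLAIM (what is proved, stated in full; the proofs are below) =====
def Claim_equal_bilboard : Prop := ∀ (k : Int) (t : Int) (l : List Int), Dom_bilboard k t l → Pre_bilboard k t l → Spec_bilboard k t l (bilboard k t l)

-- ===== LEMMAS AND PROOFS =====

-- the list of t-scaled sums of the (m+1)-sized blocks of a list (last block partial)
def bsums (t : Int) (m : Nat) : List Int → List Int
  | [] => []
  | x :: xs => t * ((x :: xs).take (m+1)).sum :: bsums t m ((x :: xs).drop (m+1))
termination_by xs => xs.length
decreasing_by simp

lemma bsums_nil (t : Int) (m : Nat) : bsums t m [] = [] := by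
  rw [bsums]

lemma sum_map_mul (t : Int) (ys : List Int) : (ys.map (fun y => t * y)).sum = t * ys.sum := by
  simpa using List.sum_map_mul_left ys id t

lemma write_set (buf : List Int) (M : Nat) (r : Nat) (v : Int) (hlen : buf.length = r) (hr : r < M) :
    (buf ++ List.replicate (M - r) 0).set r v = (buf ++ [v]) ++ List.replicate (M - (r + 1)) 0 := by
  have hM : M - r = (M - (r + 1)) + 1 := by omega
  rw [List.set_append]
  simp [hlen, hM, List.replicate_succ]

-- one step strictly inside a chunk (no flush; append only when it is the very last element)
lemma stepA_mid (t : Int) (m n : Nat) (j : Nat) (y : Int) (buf suma : List Int)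
    (hb : 1 ≤ buf.length) (hlt : buf.length < m+1) (hj : j % (m+1) = buf.length) :
    stepA t ((m+1 : Nat) : Int) ((n : Nat) : Int)
        (buf ++ List.replicate (m+1 - buf.length) 0, suma) ((j : Int), y)
    = ((buf ++ [t*y]) ++ List.replicate (m+1 - (buf.length+1)) 0,
       if j+1 = n then suma ++ [(buf ++ [t*y]).sum] else suma) := by
  have hmod : PySem.Int.mod ((j : Nat) : Int) ((m+1 : Nat) : Int) = ((j % (m+1) : Nat) : Int) :=
    PySem.Int.mod_natCast j (m+1)
  simp only [stepA]
  rw [if_neg (by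
    rw [hmod, hj]
    rintro ⟨h1, -⟩
    exact absurd (by exact_mod_cast h1 : buf.length = 0) (by omega))]
  dsimp only
  rw [hmod, hj, Int.toNat_natCast, write_set buf (m+1) buf.length (t*y) rfl hlt]
  by_cases hc : j + 1 = n
  · rw [if_pos (by exact_mod_cast hc), if_pos hc]
    refine congrArg₂ Prod.mk rfl ?_
    simp
  · rw [if_neg (by intro h; exact hc (by exact_mod_cast h)), if_neg hc]

-- the first step of a chunk: flush (if j ≠ 0), fresh buffer gets t*y at slot 0
lemma stepA_start (t : Int) (m n : Nat) (j : Nat) (y : Int) (buf suma : List Int)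
    (hj0 : j % (m+1) = 0) (hbuf : j = 0 → buf = List.replicate (m+1) 0) :
    stepA t ((m+1 : Nat) : Int) ((n : Nat) : Int) (buf, suma) ((j : Int), y)
    = ([t*y] ++ List.replicate m 0,
       if j+1 = n then (suma ++ (if j = 0 then [] else [buf.sum])) ++ [t*y]
       else suma ++ (if j = 0 then [] else [buf.sum])) := by
  have hmod : PySem.Int.mod ((j : Nat) : Int) ((m+1 : Nat) : Int) = ((j % (m+1) : Nat) : Int) :=
    PySem.Int.mod_natCast j (m+1)
  have hset : (List.replicate (m+1) (0 : Int)).set 0 (t*y) = [t*y] ++ List.replicate m 0 := by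
    simp [List.replicate_succ]
  by_cases hz : j = 0
  · subst hz
    rw [hbuf rfl]
    simp only [stepA]
    rw [if_neg (by rintro ⟨-, h2⟩; exact h2 rfl)]
    dsimp only
    rw [hmod, hj0, Int.toNat_natCast, hset]
    by_cases hc : 0 + 1 = n
    · rw [if_pos (by exact_mod_cast hc), if_pos hc]
      refine congrArg₂ Prod.mk rfl ?_
      simp
    · rw [if_neg (by intro h; exact hc (by exact_mod_cast h)), if_neg hc]
      simp
  · simp only [stepA]
    rw [if_pos ⟨by rw [hmod, hj0]; rfl, by exact_mod_cast Nat.cast_ne_zero.mpr hz⟩]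
    dsimp only
    rw [hmod, hj0, Int.toNat_natCast, Int.toNat_natCast, hset]
    rw [if_neg hz]
    by_cases hc : j + 1 = n
    · rw [if_pos (by exact_mod_cast hc), if_pos hc]
      refine congrArg₂ Prod.mk rfl ?_
      simp
    · rw [if_neg (by intro h; exact hc (by exact_mod_cast h)), if_neg hc]

-- filling the rest of a chunk, element by element
lemma fill (t : Int) (m n : Nat) :
    ∀ (ys : List Int) (j : Nat) (buf suma : List Int),
    (ys ≠ [] → 1 ≤ buf.length ∧ j % (m+1) = buf.length) →
    buf.length + ys.length ≤ m+1 →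
    j + ys.length ≤ n →
    (PySem.List.enumerate ys (j : Int)).foldl (stepA t ((m+1 : Nat) : Int) ((n : Nat) : Int))
        (buf ++ List.replicate (m+1 - buf.length) 0, suma)
    = ((buf ++ ys.map (fun y => t * y)) ++ List.replicate (m+1 - buf.length - ys.length) 0,
       suma ++ (if j + ys.length = n ∧ ys ≠ [] then [(buf ++ ys.map (fun y => t * y)).sum] else [])) := by
  intro ys
  induction ys with
  | nil =>
    intro j buf suma _ _ _
    simp [PySem.List.enumerate_nil]
  | cons y rest ih =>
    intro j buf suma h0 h1 h2
    obtain ⟨hb1, hbj⟩ := h0 (by simp)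
    have hlt : buf.length < m + 1 := by simp at h1; omega
    rw [PySem.List.enumerate_cons]
    simp only [List.foldl_cons]
    rw [stepA_mid t m n j y buf suma hb1 hlt hbj]
    by_cases hrest : rest = []
    · subst hrest
      simp only [PySem.List.enumerate_nil, List.foldl_nil]
      by_cases hc : j + 1 = n
      · rw [if_pos hc]
        simp [hc, Nat.sub_sub]
      · rw [if_neg hc]
        simp [hc, Nat.sub_sub]
    · have hr1 : 1 ≤ rest.length := List.length_pos_iff.mpr hrest
      have hc : j + 1 ≠ n := by simp at h2; omega
      rw [if_neg hc]
      have hcast : ((j : Int) + 1) = ((j + 1 : Nat) : Int) := by push_cast; ring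
      rw [hcast]
      have hlen2 : (buf ++ [t*y]).length = buf.length + 1 := by simp
      have hmd : (j + 1) % (m+1) = buf.length + 1 := by
        have hm1 : 1 ≤ m := by simp at h1; omega
        rw [Nat.add_mod, hbj, Nat.mod_eq_of_lt (show 1 < m+1 by omega),
            Nat.mod_eq_of_lt (show buf.length + 1 < m+1 by simp at h1; omega)]
      have hih := ih (j+1) (buf ++ [t*y]) suma
        (fun _ => ⟨by simp, by rw [hlen2]; exact hmd⟩)
        (by simp at h1 ⊢; omega) (by simp at h2 ⊢; omega)
      rw [hlen2] at hih
      rw [show m + 1 - (buf.length + 1) = m + 1 - buf.length - 1 from by omega] at hih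
      rw [show m + 1 - (buf.length + 1) = m + 1 - buf.length - 1 from by omega]
      rw [hih]
      by_cases hend : j + 1 + rest.length = n
      · rw [if_pos ⟨hend, hrest⟩, if_pos ⟨by simp; omega, by simp⟩]
        simp [Nat.sub_sub] <;> omega
      · rw [if_neg (by rintro ⟨h, -⟩; exact hend h),
            if_neg (by rintro ⟨h, -⟩; exact hend (by simp at h; omega))]
        simp [Nat.sub_sub] <;> omega

-- A's loop processed chunk by chunk: the collected list is exactly the block sums
lemma chunks (t : Int) (m n : Nat) :
    ∀ (len : Nat) (xs : List Int) (j : Nat) (buf suma : List Int),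
    xs.length ≤ len → xs ≠ [] → j % (m+1) = 0 → (j = 0 → buf = List.replicate (m+1) 0) →
    j + xs.length = n →
    ((PySem.List.enumerate xs (j : Int)).foldl (stepA t ((m+1 : Nat) : Int) ((n : Nat) : Int)) (buf, suma)).2
      = (suma ++ (if j = 0 then [] else [buf.sum])) ++ bsums t m xs := by
  intro len
  induction len with
  | zero =>
    intro xs j buf suma hlen hne _ _ _
    exact absurd (List.eq_nil_of_length_eq_zero (by omega)) hne
  | succ len ih =>
    intro xs j buf suma hlen hne hj0 hbuf hn
    match xs, hne with
    | x :: rest, _ =>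
    rw [PySem.List.enumerate_cons]
    simp only [List.foldl_cons]
    rw [stepA_start t m n j x buf suma hj0 hbuf]
    by_cases hrest : rest = []
    · subst hrest
      have hc : j + 1 = n := by simp at hn; omega
      rw [if_pos hc]
      simp only [PySem.List.enumerate_nil, List.foldl_nil]
      rw [bsums]
      simp [bsums_nil]
    · have hr1 : 1 ≤ rest.length := List.length_pos_iff.mpr hrest
      have hc : j + 1 ≠ n := by simp at hn; omega
      rw [if_neg hc]
      have hcast : ((j : Int) + 1) = ((j + 1 : Nat) : Int) := by push_cast; ring
      rw [hcast]
      -- split the rest of this chunk from the following chunks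
      rw [show rest = rest.take m ++ rest.drop m from (List.take_append_drop m rest).symm,
          PySem.List.enumerate_append, List.foldl_append]
      have hfill := fill t m n (rest.take m) (j+1) [t*x] (suma ++ (if j = 0 then [] else [buf.sum]))
        (fun hne2 => ⟨by simp, by
          have hm1 : 1 ≤ m := by
            rcases Nat.eq_zero_or_pos m with h | h
            · subst h; simp at hne2
            · omega
          rw [Nat.add_mod, hj0, Nat.mod_eq_of_lt (show 1 < m+1 by omega)]
          simp [Nat.mod_eq_of_lt (show 1 < m+1 by omega)]⟩)
        (by simp; omega) (by
          have : (rest.take m).length ≤ rest.length := by simp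
          simp at hn ⊢; omega)
      rw [show ([t*x] : List Int) ++ List.replicate (m + 1 - ([t*x] : List Int).length) 0
            = [t*x] ++ List.replicate m 0 from by simp] at hfill
      rw [hfill]
      by_cases hdrop : rest.drop m = []
      · -- the whole remainder fits in this chunk: it is the last (possibly partial) block
        have hrm : rest.length ≤ m := by
          have := List.drop_eq_nil_iff.mp hdrop
          omega
        rw [List.take_of_length_le hrm] at hfill ⊢
        rw [hdrop]
        simp only [PySem.List.enumerate_nil, List.foldl_nil]
        have hendT : j + 1 + rest.length = n := by simp at hn; omega
        rw [if_pos (show j + 1 + rest.length = n ∧ rest ≠ [] from ⟨hendT, hrest⟩)]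
        rw [bsums]
        rw [List.take_of_length_le (by simp; omega), List.drop_eq_nil_of_le (by simp; omega)]
        simp [bsums, sum_map_mul, mul_add]
      · -- a full chunk, then recurse on the remaining chunks
        have hmr : m < rest.length := by
          by_contra hcon
          exact hdrop (List.drop_eq_nil_of_le (by omega))
        have hlen3 : (rest.take m).length = m := by simp; omega
        have hnend : j + 1 + (rest.take m).length ≠ n := by
          rw [hlen3]; simp at hn; omega
        rw [if_neg (show ¬ (j + 1 + (rest.take m).length = n ∧ rest.take m ≠ []) from
              fun hq => hnend hq.1)]
        rw [show m + 1 - ([t*x] : List Int).length - (rest.take m).length = 0 from by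
              simp [hlen3]]
        simp only [List.replicate_zero, List.append_nil]
        rw [hlen3]
        have hcast2 : ((j + 1 : Nat) : Int) + ((m : Nat) : Int)
            = ((j + 1 + m : Nat) : Int) := by push_cast; ring
        rw [hcast2]
        have hih := ih (rest.drop m) (j + 1 + m) ([t*x] ++ (rest.take m).map (fun y => t * y))
          (suma ++ (if j = 0 then [] else [buf.sum]))
          (by simp at hlen ⊢; omega) hdrop
          (by rw [show j + 1 + m = j + (m + 1) from by omega, Nat.add_mod_right, hj0])
          (by intro h; omega)
          (by simp at hn ⊢; omega)
        rw [hih]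
        rw [if_neg (show ¬ j + 1 + m = 0 from by omega)]
        rw [bsums]
        rw [List.take_succ_cons, List.drop_succ_cons,
            show rest.take (m) = rest.take m from rfl]
        have hsum : ([t*x] ++ (rest.take m).map (fun y => t * y)).sum
            = t * (x :: rest.take m).sum := by
          simp [mul_add, ← List.map_take, sum_map_mul]
        rw [hsum]
        simp [List.append_assoc]

-- B's first loop builds the prefix-sum table
lemma prefix_fold (l : List Int) :
    ∀ (xs : List Int) (j : Nat), xs = l.drop j → j ≤ l.length →
    (PySem.List.enumerate xs (j : Int)).foldl (fun P p => P ++ [PySem.List.pyGetD P p.1 0 + p.2])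
        ((List.range (j+1)).map (fun i => (l.take i).sum))
    = (List.range (l.length+1)).map (fun i => (l.take i).sum) := by
  intro xs
  induction xs generalizing l with
  | nil =>
    intro j hx hj
    have hlen : l.length ≤ j := List.drop_eq_nil_iff.mp hx.symm
    have : j = l.length := by omega
    subst this
    simp [PySem.List.enumerate_nil]
  | cons x rest ih =>
    intro j hx hj
    have hjlt : j < l.length := by
      by_contra hcon
      have : l.drop j = [] := List.drop_eq_nil_of_le (by omega)
      rw [this] at hx
      exact absurd hx (by simp)
    rw [PySem.List.enumerate_cons]
    simp only [List.foldl_cons]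
    have hget : PySem.List.pyGetD ((List.range (j+1)).map (fun i => (l.take i).sum)) ((j : Nat) : Int) 0
        = (l.take j).sum := by
      rw [PySem.List.pyGetD_natCast]
      have := PySem.List.getD_map_range (fun i => (l.take i).sum) (j+1) j 0 (by omega)
      simpa using this
    rw [hget]
    have hxj : x = l[j]'hjlt := by
      have h0 := List.getElem_of_eq hx (show 0 < (x :: rest).length by simp)
      simp [List.getElem_drop] at h0
      exact h0
    have hstep : (List.range (j+1)).map (fun i => (l.take i).sum) ++ [(l.take j).sum + x]
        = (List.range ((j+1)+1)).map (fun i => (l.take i).sum) := by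
      conv_rhs => rw [List.range_succ]
      rw [List.map_append]
      simp [List.sum_take_succ l j hjlt, hxj]
    rw [hstep]
    have hcast : ((j : Int) + 1) = ((j + 1 : Nat) : Int) := by push_cast; ring
    rw [hcast]
    exact ih l (j+1) (by
      have : l.drop (j+1) = (l.drop j).drop 1 := by rw [List.drop_drop]
      rw [this, ← hx]
      simp) (by omega)

lemma pyRange_pos_nil (a b s : Int) (hba : b ≤ a) (hs : 0 < s) :
    PySem.List.pyRange a b s = [] := by
  rw [PySem.List.pyRange_of_pos _ _ hs, if_neg (by omega)]
  simp

lemma pyRange_pos_cons (a b s : Int) (hab : a < b) (hs : 0 < s) :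
    PySem.List.pyRange a b s = a :: PySem.List.pyRange (a+s) b s := by
  rw [PySem.List.pyRange_of_pos _ _ hs, PySem.List.pyRange_of_pos _ _ hs, if_pos hab]
  have hq0 : 0 ≤ (if a + s < b then ((b - (a+s) + s - 1) / s) else 0) := by
    split
    · exact Int.ediv_nonneg (by omega) (by omega)
    · omega
  have hkey : ((b - a + s - 1) / s) = (if a + s < b then ((b - (a+s) + s - 1) / s) else 0) + 1 := by
    by_cases hcb : a + s < b
    · rw [if_pos hcb]
      rw [show b - a + s - 1 = (b - (a+s) + s - 1) + 1 * s from by ring,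
          Int.add_mul_ediv_right _ _ (by omega)]
    · rw [if_neg hcb]
      rw [← PySem.Int.floordiv_eq_ediv_of_pos hs, PySem.Int.floordiv_eq_iff_of_pos hs]
      constructor
      · omega
      · omega
  rw [hkey, show ((if a + s < b then ((b - (a+s) + s - 1) / s) else 0) + 1).toNat
      = (if a + s < b then ((b - (a+s) + s - 1) / s) else 0).toNat + 1 from by omega]
  rw [show ((if a + s < b then ((b - (a+s) + s - 1) / s) else 0)).toNat
      = (if a + s < b then ((b - (a+s) + s - 1) / s).toNat else 0) from by split <;> rfl]
  rw [List.range_succ_eq_map]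
  simp only [List.map_cons, List.map_map]
  refine congrArg₂ List.cons (by ring) ?_
  apply List.map_congr_left
  intro k _
  simp
  push_cast
  ring

-- B's generator over chunk starts yields exactly the block sums
lemma chunk_of_range (t : Int) (l : List Int) (m : Nat) :
    ∀ (len : Nat) (xs : List Int) (c : Nat), xs.length ≤ len → xs = l.drop c → c ≤ l.length →
    (PySem.List.pyRange (c : Int) ((l.length : Nat) : Int) ((m+1 : Nat) : Int)).map
      (fun i => t * (PySem.List.pyGetD ((List.range (l.length+1)).map (fun i => (l.take i).sum)) (min (i + ((m+1 : Nat) : Int)) ((l.length : Nat) : Int)) 0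
                   - PySem.List.pyGetD ((List.range (l.length+1)).map (fun i => (l.take i).sum)) i 0))
    = bsums t m xs := by
  intro len
  induction len with
  | zero =>
    intro xs c hlen hx hc
    have hxe : xs = [] := List.eq_nil_of_length_eq_zero (by omega)
    subst hxe
    have : l.length ≤ c := List.drop_eq_nil_iff.mp hx.symm
    rw [pyRange_pos_nil _ _ _ (by exact_mod_cast this) (by exact_mod_cast Nat.succ_pos m)]
    simp [bsums_nil]
  | succ len ih =>
    intro xs c hlen hx hc
    match xs with
    | [] =>
      have : l.length ≤ c := List.drop_eq_nil_iff.mp hx.symm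
      rw [pyRange_pos_nil _ _ _ (by exact_mod_cast this) (by exact_mod_cast Nat.succ_pos m)]
      simp [bsums_nil]
    | x :: rest =>
    have hclt : c < l.length := by
      by_contra hcon
      have : l.drop c = [] := List.drop_eq_nil_of_le (by omega)
      rw [this] at hx
      exact absurd hx (by simp)
    rw [pyRange_pos_cons _ _ _ (by exact_mod_cast hclt) (by exact_mod_cast Nat.succ_pos m)]
    rw [List.map_cons]
    have hminc : min ((c : Int) + ((m+1 : Nat) : Int)) ((l.length : Nat) : Int)
        = ((min (c + (m+1)) l.length : Nat) : Int) := by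
      push_cast
      simp
    have hgetmin : PySem.List.pyGetD ((List.range (l.length+1)).map (fun i => (l.take i).sum))
        ((min (c + (m+1)) l.length : Nat) : Int) 0 = (l.take (min (c + (m+1)) l.length)).sum := by
      rw [PySem.List.pyGetD_natCast]
      have := PySem.List.getD_map_range (fun i => (l.take i).sum) (l.length+1)
        (min (c + (m+1)) l.length) 0 (by omega)
      simpa using this
    have hgetc : PySem.List.pyGetD ((List.range (l.length+1)).map (fun i => (l.take i).sum))
        ((c : Nat) : Int) 0 = (l.take c).sum := by
      rw [PySem.List.pyGetD_natCast]
      have := PySem.List.getD_map_range (fun i => (l.take i).sum) (l.length+1) c 0 (by omega)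
      simpa using this
    have htake : l.take (min (c + (m+1)) l.length) = l.take c ++ (l.drop c).take (m+1) := by
      have h1 : (l.drop c).take (m+1) = (l.drop c).take (min (c + (m+1)) l.length - c) := by
        rw [List.take_eq_take_iff]
        simp
        omega
      rw [h1, ← List.take_add, show c + (min (c + (m+1)) l.length - c) = min (c + (m+1)) l.length from by omega]
    have hhead : t * ((l.take (min (c + (m+1)) l.length)).sum - (l.take c).sum)
        = t * ((x :: rest).take (m+1)).sum := by
      rw [htake, List.sum_append, hx]
      ring
    rw [bsums]
    refine congrArg₂ List.cons ?_ ?_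
    · rw [hminc, hgetmin, hgetc, hhead]
    · by_cases hc2 : c + (m+1) ≤ l.length
      · have hcast2 : (c : Int) + ((m+1 : Nat) : Int) = ((c + (m+1) : Nat) : Int) := by push_cast; ring
        rw [hcast2]
        have hdrop : (x :: rest).drop (m+1) = l.drop (c + (m+1)) := by
          rw [hx, List.drop_drop]
        exact ih ((x :: rest).drop (m+1)) (c + (m+1)) (by simp at hlen ⊢ <;> omega) hdrop hc2
      · rw [pyRange_pos_nil _ _ _ (by push_cast; omega) (by exact_mod_cast Nat.succ_pos m)]
        have hlxr : (x :: rest).length = l.length - c := by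
          rw [hx, List.length_drop]
        have : (x :: rest).drop (m+1) = [] := List.drop_eq_nil_of_le (by omega)
        rw [this]
        simp [bsums_nil]

-- chunk size is positive on Pre_
lemma itr_pos (k : Int) (l : List Int) (hk : 0 < k) (hl : l ≠ []) :
    1 ≤ (if PySem.Int.mod (l.length : Int) k ≠ 0 then PySem.Int.mod (l.length : Int) k
         else PySem.Int.floordiv (l.length : Int) k) := by
  have hn : 1 ≤ (l.length : Int) := by
    have : l.length ≠ 0 := fun hc => hl (List.eq_nil_of_length_eq_zero hc)
    omega
  by_cases h : PySem.Int.mod (l.length : Int) k ≠ 0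
  · rw [if_pos h]
    have := PySem.Int.mod_nonneg (l.length : Int) hk
    omega
  · rw [if_neg h]
    push_neg at h
    have hdvd : k ∣ (l.length : Int) := (PySem.Int.mod_eq_zero_iff_dvd _ _).mp h
    rw [PySem.Int.floordiv_eq_ediv_of_pos hk]
    have hkn : k ≤ (l.length : Int) := Int.le_of_dvd (by omega) hdvd
    have := Int.le_ediv_iff_mul_le hk (b := (l.length : Int)) (a := 1)
    omega

-- ===== VERDICT (by name: the statement is the Claim_ definition above) =====
theorem bilboard_spec : Claim_equal_bilboard := by
  intro k t l _ hpre
  obtain ⟨hk, hl⟩ := hpre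
  unfold Spec_bilboard bilboard bilboard_alt
  dsimp only
  set n : Int := (l.length : Int) with hn
  set itr : Int := if PySem.Int.mod n k ≠ 0 then PySem.Int.mod n k else PySem.Int.floordiv n k with hitr
  have hpos : 1 ≤ itr := itr_pos k l hk hl
  have hm : itr = ((itr.toNat - 1 + 1 : Nat) : Int) := by omega
  set m : Nat := itr.toNat - 1
  have hA : ((PySem.List.enumerate l 0).foldl (stepA t itr n) (List.replicate itr.toNat 0, [])).2
      = bsums t m l := by
    have h0 : ((0 : Nat) : Int) = (0 : Int) := rfl
    have := chunks t m l.length l.length l 0 (List.replicate (m+1) 0) [] le_rfl hl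
      (by simp) (fun _ => rfl) (by omega)
    rw [h0] at this
    rw [hm, hn]
    simp only [Int.toNat_natCast]
    rw [this]
    simp
  have hP : (PySem.List.enumerate l 0).foldl (fun P p => P ++ [PySem.List.pyGetD P p.1 0 + p.2]) [(0 : Int)]
      = (List.range (l.length+1)).map (fun i => (l.take i).sum) := by
    have h0 : ((0 : Nat) : Int) = (0 : Int) := rfl
    have := prefix_fold l l 0 rfl (by omega)
    rw [h0] at this
    rw [← this]
    rfl
  have hB : (PySem.List.pyRange 0 n itr).map
      (fun i => t * (PySem.List.pyGetD ((List.range (l.length+1)).map (fun i => (l.take i).sum)) (min (i + itr) n) 0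
                   - PySem.List.pyGetD ((List.range (l.length+1)).map (fun i => (l.take i).sum)) i 0))
      = bsums t m l := by
    have h0 : ((0 : Nat) : Int) = (0 : Int) := rfl
    have := chunk_of_range t l m l.length l 0 le_rfl rfl (by omega)
    rw [h0] at this
    rw [hm, hn]
    exact this
  rw [hA, hP, hB]
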